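-- pv_equiv track=rewrite | github.com/Miika0320/uo | ITI1120 - Python 2020/test4B_300164161/test4B_300164161.py | mekong
-- ===== SOURCE A (Python) =====
-- def mekong(L, div):
--     '''(list of int, list of int)-> list of tuples
--
--      Preconditions:
--     - There are no two elements in the list L that are the same,
--       and list L is sorted from smallest to the largest number
--     - List div is not empty and it does not contain zero
--
--     This function should return a list containing the following
--     pairs of numbers from L:
--     For every pair of distinct integers from L, you need to test
--     if both of those numbers are divisible by at least one of
--     the numbers in list div. If yes, that pair should be added to
--     the resulting list, otherwise it should not be added.
--     A pair should be added at most ONCE.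
--
--     For example if L=[5, 16, 24, 50, 72] and div=[3, 5, 8, 10] the function
--     should return list of tuples [(5, 50), (16, 24), (16, 72), (24, 72)] because
--     5 and 50 are both divisible by 5,
--     16 and 24 are both divisible by 8
--     16 and 72 are both divisible by 8
--     24 and 72 are both divisible by 3 (and 8)
--     The other pairs are not there since they do now have a common divisor in list div.
--     For example pair (5,16) is not there since there is no number in div that
--     divides both 5 and 16
--
--
--     >>> mekong([5, 16, 24, 50, 72], [3, 5, 8, 10])
--     [(5, 50), (16, 24), (16, 72), (24, 72)]
--     >>> mekong([5, 12, 18, 21],[3, 8])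
--     [(12, 18), (12, 21), (18, 21)]
--     >>> mekong([5, 14, 21, 70],[7, 5, 100])
--     [(5, 70), (14, 21), (14, 70), (21, 70)]
--     >>> mekong([5, 6, 12, 18, 21],[11])
--     []
--     >>> mekong([20,30,33],[10])
--     [(20, 30)]
--     '''
--
--     # YOUR CODE GOES HERE
--     LoT = []
--     tup = ()
--     temp = []
--     for j in div:
--         temp = []
--         for i in range(len(L)):
--             if L[i]%j == 0:
--                 temp.append(L[i])
--         if len(temp)>1:
--             for k in range(len(temp)-1):
--                 for l in range(1,len(temp)):
--                     if k+l < len(temp):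
--                         tup = (temp[k], temp[k+l])
--                         if tup not in LoT:
--                             LoT.append(tup)
--     LoT.sort()
--
--     return LoT
-- ===== SOURCE B (Python) =====
-- def mekong(L, div):
--     pairs = {(L[i], L[j])
--              for i in range(len(L))
--              for j in range(i + 1, len(L))
--              if any(L[i] % d == 0 and L[j] % d == 0 for d in div)}
--     return sorted(pairs)
-- ===== Notes on version B (the rewrite author's own statement) =====
-- stated objective: simpler
-- what changed: A groups L by each divisor, emits all in-group index pairs and dedups with an 'in LoT' list scan before sorting; B is a single set comprehension over index pairs i<j testing any(common divisor) and then sorts, dropping the per-divisor grouping and the explicit dedup pass entirely.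
import Mathlib
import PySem

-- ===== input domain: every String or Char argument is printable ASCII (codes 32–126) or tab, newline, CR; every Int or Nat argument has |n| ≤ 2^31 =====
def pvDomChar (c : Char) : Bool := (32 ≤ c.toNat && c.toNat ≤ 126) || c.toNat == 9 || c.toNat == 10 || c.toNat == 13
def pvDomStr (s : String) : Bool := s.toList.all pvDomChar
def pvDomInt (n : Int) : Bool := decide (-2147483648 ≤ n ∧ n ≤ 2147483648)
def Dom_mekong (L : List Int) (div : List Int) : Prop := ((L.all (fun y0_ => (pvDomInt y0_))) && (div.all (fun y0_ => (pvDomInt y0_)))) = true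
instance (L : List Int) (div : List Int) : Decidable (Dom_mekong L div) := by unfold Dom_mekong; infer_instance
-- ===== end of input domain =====

-- B replaces A's per-divisor grouping with its quadruple loop and membership-list dedup by one
-- set comprehension over index pairs i<j followed by a sort; objective: simpler.

-- ===== PORT A =====
def mekong (L : List Int) (div : List Int) : List (Int × Int) :=
  let LoT : List (Int × Int) := []
  let LoT := div.foldl (fun LoT j =>
    let temp : List Int := []
    let temp := (PySem.List.pyRange 0 (L.length : Int) 1).foldl
      (fun temp i =>
        if PySem.Int.mod (PySem.List.pyGetD L i 0) j == 0 then temp ++ [PySem.List.pyGetD L i 0]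
        else temp) temp
    if 1 < temp.length then
      (PySem.List.pyRange 0 ((temp.length : Int) - 1) 1).foldl (fun LoT k =>
        (PySem.List.pyRange 1 (temp.length : Int) 1).foldl (fun LoT l =>
          if k + l < (temp.length : Int) then
            let tup := (PySem.List.pyGetD temp k 0, PySem.List.pyGetD temp (k + l) 0)
            if tup ∈ LoT then LoT else LoT ++ [tup]
          else LoT) LoT) LoT
    else LoT) LoT
  PySem.List.sorted2 LoT (fun t => t.1) (fun t => t.2) false

-- ===== PORT B =====
def mekong_alt (L : List Int) (div : List Int) : List (Int × Int) :=
  let pairs : PySem.Set (Int × Int) := PySem.Set.ofList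
    ((PySem.List.pyRange 0 (L.length : Int) 1).flatMap (fun i =>
      ((PySem.List.pyRange (i + 1) (L.length : Int) 1).filter (fun j =>
        div.any (fun d =>
          (PySem.Int.mod (PySem.List.pyGetD L i 0) d == 0) &&
          (PySem.Int.mod (PySem.List.pyGetD L j 0) d == 0)))).map
        (fun j => (PySem.List.pyGetD L i 0, PySem.List.pyGetD L j 0))))
  PySem.List.sorted2 pairs (fun t => t.1) (fun t => t.2) false

-- ===== PRECONDITION & SPEC =====
-- Pre_ excludes exactly the inputs where Python A raises ZeroDivisionError: 0 ∈ div with L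
-- nonempty (with L = [] the '%' is never evaluated and A returns []).
def Pre_mekong (L : List Int) (div : List Int) : Prop := L = [] ∨ (0 : Int) ∉ div
instance (L : List Int) (div : List Int) : Decidable (Pre_mekong L div) := by
  unfold Pre_mekong; infer_instance

def pvWitness_mekong : List Int × List Int := ([5, 16, 24, 50, 72], [3, 5, 8, 10])

def Spec_mekong (L : List Int) (div : List Int) (out : List (Int × Int)) : Prop := out = mekong_alt L div
instance (L : List Int) (div : List Int) (out : List (Int × Int)) : Decidable (Spec_mekong L div out) := by unfold Spec_mekong; infer_instance

-- ===== CLAIM (what is proved, stated in full; the proofs are below) =====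
def Claim_equal_mekong : Prop := ∀ (L : List Int) (div : List Int), Dom_mekong L div → Pre_mekong L div → Spec_mekong L div (mekong L div)

-- ===== LEMMAS AND PROOFS =====

-- the lexicographic order Python uses to sort int pairs, and sorted2's strict comparator
def pvLexLe (a b : Int × Int) : Prop := a.1 < b.1 ∨ (a.1 = b.1 ∧ a.2 ≤ b.2)
def pvLt2 (a b : Int × Int) : Bool := decide (a.1 < b.1) || (!decide (b.1 < a.1) && decide (a.2 < b.2))

theorem pv_sorted2_eq_foldl (xs : List (Int × Int)) :
    PySem.List.sorted2 xs (fun t => t.1) (fun t => t.2) false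
      = xs.foldl (fun acc x => PySem.List.insertBy pvLt2 x acc) [] := rfl

theorem pv_insertBy_pairwise (x : Int × Int) (ys : List (Int × Int))
    (h : ys.Pairwise pvLexLe) :
    (PySem.List.insertBy pvLt2 x ys).Pairwise pvLexLe := by
  induction ys with
  | nil => simp [PySem.List.insertBy, pvLexLe]
  | cons y ys ih =>
    rw [PySem.List.insertBy]
    rw [List.pairwise_cons] at h
    obtain ⟨hy, hys⟩ := h
    by_cases hb : pvLt2 x y = true
    · simp only [hb, if_true]
      have hxy : pvLexLe x y := by
        simp only [pvLt2, Bool.or_eq_true, Bool.and_eq_true, Bool.not_eq_true',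
          decide_eq_true_iff, decide_eq_false_iff_not] at hb
        unfold pvLexLe; omega
      refine List.Pairwise.cons ?_ ?_
      · intro z hz
        rcases List.mem_cons.mp hz with rfl | hz
        · exact hxy
        · have := hy z hz
          unfold pvLexLe at *; omega
      · exact List.Pairwise.cons hy hys
    · simp only [hb]
      rw [if_neg (by simp_all)]
      refine List.Pairwise.cons ?_ ?_
      · intro z hz
        rcases (PySem.List.insertBy_mem_iff pvLt2 x z ys).mp hz with rfl | hz
        · simp only [pvLt2, Bool.or_eq_true, Bool.and_eq_true, Bool.not_eq_true',
            decide_eq_true_iff, decide_eq_false_iff_not] at hb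
          push Not at hb
          unfold pvLexLe; omega
        · exact hy z hz
      · exact ih hys

theorem pv_foldl_insertBy_pairwise (xs : List (Int × Int)) :
    ∀ acc : List (Int × Int), acc.Pairwise pvLexLe →
      (xs.foldl (fun acc x => PySem.List.insertBy pvLt2 x acc) acc).Pairwise pvLexLe := by
  induction xs with
  | nil => intro acc h; simpa using h
  | cons x xs ih => intro acc h; exact ih _ (pv_insertBy_pairwise x acc h)

-- Python's sort of a list of int pairs is invariant under permutation of the input
theorem pv_sorted2_congr (xs ys : List (Int × Int)) (h : xs.Perm ys) :
    PySem.List.sorted2 xs (fun t => t.1) (fun t => t.2) false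
      = PySem.List.sorted2 ys (fun t => t.1) (fun t => t.2) false := by
  apply List.Perm.eq_of_pairwise (le := pvLexLe)
  · intro a b _ _ hab hba
    unfold pvLexLe at *
    ext <;> omega
  · rw [pv_sorted2_eq_foldl]; exact pv_foldl_insertBy_pairwise xs [] (by simp)
  · rw [pv_sorted2_eq_foldl]; exact pv_foldl_insertBy_pairwise ys [] (by simp)
  · exact (PySem.List.sorted2_perm xs _ _ _).trans (h.trans (PySem.List.sorted2_perm ys _ _ _).symm)

-- generic membership / nodup laws for an accumulator threaded through foldl
theorem pv_foldl_mem_step {β : Type} (g : List (Int × Int) → β → List (Int × Int))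
    (Q : β → Int × Int → Prop)
    (hg : ∀ s b y, y ∈ g s b ↔ y ∈ s ∨ Q b y) :
    ∀ (l : List β) (s : List (Int × Int)) (y : Int × Int),
      y ∈ l.foldl g s ↔ y ∈ s ∨ ∃ b ∈ l, Q b y := by
  intro l
  induction l with
  | nil => simp
  | cons b l ih =>
    intro s y
    simp only [List.foldl_cons, ih, hg, List.mem_cons, exists_eq_or_imp]
    tauto

theorem pv_foldl_nodup_step {β : Type} (g : List (Int × Int) → β → List (Int × Int))
    (hg : ∀ s b, s.Nodup → (g s b).Nodup) :
    ∀ (l : List β) (s : List (Int × Int)), s.Nodup → (l.foldl g s).Nodup := by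
  intro l
  induction l with
  | nil => exact fun s h => h
  | cons b l ih => intro s h; exact ih _ (hg _ _ h)

-- "x occurs strictly before y" as positions = as a two-element sublist
theorem pv_pairAt_iff_sublist (l : List Int) (x y : Int) :
    (∃ k m : Nat, k < m ∧ l[k]? = some x ∧ l[m]? = some y) ↔ List.Sublist [x, y] l := by
  constructor
  · rintro ⟨k, m, hkm, hk, hm⟩
    obtain ⟨hk', hkx⟩ := List.getElem?_eq_some_iff.mp hk
    have h1 : l.drop k = x :: l.drop (k+1) := by
      rw [List.drop_eq_getElem_cons hk', hkx]
    have hy : y ∈ l.drop (k+1) := by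
      obtain ⟨hm', hmy⟩ := List.getElem?_eq_some_iff.mp hm
      have : (l.drop (k+1))[m - (k+1)]? = some y := by
        rw [List.getElem?_drop]
        have : k + 1 + (m - (k+1)) = m := by omega
        rw [this, hm]
      exact List.mem_of_getElem? this
    have hsub : List.Sublist [x, y] (l.drop k) := by
      rw [h1]
      exact List.cons_sublist_cons.mpr (List.singleton_sublist.mpr hy)
    exact hsub.trans (List.drop_sublist k l)
  · intro h
    induction l with
    | nil => simp at h
    | cons a l ih =>
      cases h with
      | cons _ h' =>
        obtain ⟨k, m, hkm, hk, hm⟩ := ih h'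
        exact ⟨k+1, m+1, by omega, by simpa using hk, by simpa using hm⟩
      | cons₂ _ h' =>
        obtain ⟨m, hm⟩ := List.getElem?_of_mem (List.singleton_sublist.mp h')
        exact ⟨0, m+1, by omega, by simp, by simpa using hm⟩

theorem pv_pair_sublist_filter (p : Int → Bool) (l : List Int) (x y : Int) :
    List.Sublist [x, y] (l.filter p) ↔ List.Sublist [x, y] l ∧ p x ∧ p y := by
  constructor
  · intro h
    refine ⟨h.trans List.filter_sublist, ?_, ?_⟩
    · exact (List.mem_filter.mp (h.mem (by simp))).2
    · exact (List.mem_filter.mp (h.mem (by simp))).2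
  · rintro ⟨h, hx, hy⟩
    have := List.Sublist.filter p h
    simpa [List.filter, hx, hy] using this

-- membership law of A's pair-collecting double loop over one divisor's temp list
theorem pv_pairs_loops_mem (temp : List Int) (s : List (Int × Int)) (y : Int × Int) :
    (y ∈ if 1 < temp.length then
      (PySem.List.pyRange 0 ((temp.length : Int) - 1) 1).foldl (fun LoT k =>
        (PySem.List.pyRange 1 (temp.length : Int) 1).foldl (fun LoT l =>
          if k + l < (temp.length : Int) then
            let tup := (PySem.List.pyGetD temp k 0, PySem.List.pyGetD temp (k + l) 0)
            if tup ∈ LoT then LoT else LoT ++ [tup]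
          else LoT) LoT) s
      else s)
    ↔ y ∈ s ∨ ∃ k m : Nat, k < m ∧ temp[k]? = some y.1 ∧ temp[m]? = some y.2 := by
  by_cases h2 : 1 < temp.length
  · rw [if_pos h2]
    have hinner : ∀ (k : Int) (s : List (Int × Int)) (y : Int × Int),
        y ∈ (PySem.List.pyRange 1 (temp.length : Int) 1).foldl (fun LoT l =>
          if k + l < (temp.length : Int) then
            let tup := (PySem.List.pyGetD temp k 0, PySem.List.pyGetD temp (k + l) 0)
            if tup ∈ LoT then LoT else LoT ++ [tup]
          else LoT) s
        ↔ y ∈ s ∨ ∃ l ∈ PySem.List.pyRange 1 (temp.length : Int) 1,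
            k + l < (temp.length : Int) ∧ y = (PySem.List.pyGetD temp k 0, PySem.List.pyGetD temp (k + l) 0) := by
      intro k s y
      refine pv_foldl_mem_step _ (fun l y => k + l < (temp.length : Int) ∧
        y = (PySem.List.pyGetD temp k 0, PySem.List.pyGetD temp (k + l) 0)) ?_ _ s y
      intro s' l y'
      dsimp only
      by_cases hg : k + l < (temp.length : Int)
      · rw [if_pos hg]
        by_cases hmem : (PySem.List.pyGetD temp k 0, PySem.List.pyGetD temp (k + l) 0) ∈ s'
        · rw [if_pos hmem]
          constructor
          · exact Or.inl
          · rintro (h | ⟨-, rfl⟩)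
            · exact h
            · exact hmem
        · rw [if_neg hmem]
          simp only [List.mem_append, List.mem_singleton]
          constructor
          · rintro (h | rfl)
            · exact Or.inl h
            · exact Or.inr ⟨hg, rfl⟩
          · rintro (h | ⟨-, rfl⟩)
            · exact Or.inl h
            · exact Or.inr rfl
      · rw [if_neg hg]
        constructor
        · exact Or.inl
        · rintro (h | ⟨hbad, -⟩)
          · exact h
          · exact absurd hbad hg
    rw [pv_foldl_mem_step _
      (fun k y => ∃ l ∈ PySem.List.pyRange 1 (temp.length : Int) 1,
        k + l < (temp.length : Int) ∧ y = (PySem.List.pyGetD temp k 0, PySem.List.pyGetD temp (k + l) 0))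
      (fun s k y => hinner k s y)]
    constructor
    · rintro (hs | ⟨k, hk, l, hl, hguard, rfl⟩)
      · exact Or.inl hs
      · refine Or.inr ?_
        rw [PySem.List.mem_pyRange_one] at hk hl
        rw [PySem.List.pyGetD_eq_getElem temp 0 (by omega) (by omega),
            PySem.List.pyGetD_eq_getElem temp 0 (by omega) (by omega)]
        exact ⟨k.toNat, (k + l).toNat, by omega,
          List.getElem?_eq_getElem (by omega), List.getElem?_eq_getElem (by omega)⟩
    · rintro (hs | ⟨k, m, hkm, hk, hm⟩)
      · exact Or.inl hs
      · obtain ⟨hk', hkx⟩ := List.getElem?_eq_some_iff.mp hk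
        obtain ⟨hm', hmy⟩ := List.getElem?_eq_some_iff.mp hm
        refine Or.inr ⟨(k : Int), ?_, ⟨((m - k : Nat) : Int), ?_, by omega, ?_⟩⟩
        · rw [PySem.List.mem_pyRange_one]; omega
        · rw [PySem.List.mem_pyRange_one]; omega
        · rw [PySem.List.pyGetD_eq_getElem temp 0 (by omega) (by omega),
              PySem.List.pyGetD_eq_getElem temp 0 (by omega) (by omega)]
          have e1 : (k : Int).toNat = k := by omega
          have e2 : ((k : Int) + ((m - k : Nat) : Int)).toNat = m := by omega
          ext
          · simp [e1, ← hkx]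
          · simp [e2, ← hmy]
  · rw [if_neg h2]
    constructor
    · exact Or.inl
    · rintro (hs | ⟨k, m, hkm, hk, hm⟩)
      · exact hs
      · obtain ⟨hm', -⟩ := List.getElem?_eq_some_iff.mp hm
        omega

-- nodup law of the same double loop
theorem pv_pairs_loops_nodup (temp : List Int) (s : List (Int × Int)) (hs : s.Nodup) :
    (if 1 < temp.length then
      (PySem.List.pyRange 0 ((temp.length : Int) - 1) 1).foldl (fun LoT k =>
        (PySem.List.pyRange 1 (temp.length : Int) 1).foldl (fun LoT l =>
          if k + l < (temp.length : Int) then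
            let tup := (PySem.List.pyGetD temp k 0, PySem.List.pyGetD temp (k + l) 0)
            if tup ∈ LoT then LoT else LoT ++ [tup]
          else LoT) LoT) s
      else s).Nodup := by
  by_cases h2 : 1 < temp.length
  · rw [if_pos h2]
    refine pv_foldl_nodup_step _ ?_ _ s hs
    intro s' k hs'
    refine pv_foldl_nodup_step _ ?_ _ s' hs'
    intro s'' l hs''
    dsimp only
    split_ifs with hg hmem
    · exact hs''
    · simp only [List.nodup_append, List.nodup_cons]
      refine ⟨hs'', by simp, ?_⟩
      intro a hamem b hbmem heq
      exact hmem (by rwa [heq, List.mem_singleton.mp hbmem] at hamem)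
    · exact hs''
  · rwa [if_neg h2]

-- temp is a filter of L
theorem pv_temp_eq (L : List Int) (j : Int) :
    (PySem.List.pyRange 0 (L.length : Int) 1).foldl
      (fun temp i =>
        if PySem.Int.mod (PySem.List.pyGetD L i 0) j == 0 then temp ++ [PySem.List.pyGetD L i 0]
        else temp) []
    = L.filter (fun x => PySem.Int.mod x j == 0) := by
  rw [PySem.List.foldl_pyRange_zero_pyGetD' L 0
    (fun temp x => if PySem.Int.mod x j == 0 then temp ++ [x] else temp) []]
  simpa using PySem.List.foldl_append_if (fun x => PySem.Int.mod x j == 0) (fun x => x) L []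

-- the two programs collect the same set of pairs
theorem pv_main (L div : List Int) : mekong L div = mekong_alt L div := by
  unfold mekong mekong_alt
  apply pv_sorted2_congr
  rw [List.perm_ext_iff_of_nodup ?hA ?hB]
  case hA =>
    refine pv_foldl_nodup_step _ ?_ div [] (by simp)
    intro s j hs
    simp only [pv_temp_eq]
    exact pv_pairs_loops_nodup _ s hs
  case hB => exact PySem.Set.nodup_ofList _
  intro t
  rw [pv_foldl_mem_step _
    (fun j y => ∃ k m : Nat, k < m ∧ (L.filter (fun x => PySem.Int.mod x j == 0))[k]? = some y.1
      ∧ (L.filter (fun x => PySem.Int.mod x j == 0))[m]? = some y.2)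
    (fun s j y => by
      simp only [pv_temp_eq]
      exact pv_pairs_loops_mem (L.filter (fun x => PySem.Int.mod x j == 0)) s y)]
  rw [PySem.Set.mem_ofList]
  simp only [List.mem_flatMap, List.mem_map, List.mem_filter, List.mem_nil_iff, false_or]
  constructor
  · rintro ⟨j, hj, hpair⟩
    rw [pv_pairAt_iff_sublist, pv_pair_sublist_filter] at hpair
    obtain ⟨hsub, hx, hy⟩ := hpair
    rw [← pv_pairAt_iff_sublist] at hsub
    obtain ⟨k, m, hkm, hk, hm⟩ := hsub
    obtain ⟨hk', hkx⟩ := List.getElem?_eq_some_iff.mp hk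
    obtain ⟨hm', hmy⟩ := List.getElem?_eq_some_iff.mp hm
    refine ⟨(k : Int), PySem.List.mem_pyRange_one.mpr (by omega), ?_⟩
    refine ⟨(m : Int), ⟨PySem.List.mem_pyRange_one.mpr (by omega), ?_⟩, ?_⟩
    · rw [List.any_eq_true]
      refine ⟨j, hj, ?_⟩
      rw [PySem.List.pyGetD_eq_getElem L 0 (by omega) (by omega),
          PySem.List.pyGetD_eq_getElem L 0 (by omega) (by omega)]
      simp only [Int.toNat_natCast, Bool.and_eq_true, beq_iff_eq]
      rw [hkx, hmy]
      exact ⟨by simpa using hx, by simpa using hy⟩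
    · rw [PySem.List.pyGetD_eq_getElem L 0 (by omega) (by omega),
          PySem.List.pyGetD_eq_getElem L 0 (by omega) (by omega)]
      simp only [Int.toNat_natCast]
      ext
      · simp [hkx]
      · simp [hmy]
  · rintro ⟨i, hi, j', ⟨hj', hany⟩, rfl⟩
    rw [PySem.List.mem_pyRange_one] at hi hj'
    rw [List.any_eq_true] at hany
    obtain ⟨d, hd, hdv⟩ := hany
    rw [PySem.List.pyGetD_eq_getElem L 0 (by omega) (by omega),
        PySem.List.pyGetD_eq_getElem L 0 (by omega) (by omega)] at hdv ⊢
    simp only [Bool.and_eq_true] at hdv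
    refine ⟨d, hd, ?_⟩
    rw [pv_pairAt_iff_sublist, pv_pair_sublist_filter]
    refine ⟨?_, by simpa using hdv.1, by simpa using hdv.2⟩
    rw [← pv_pairAt_iff_sublist]
    exact ⟨i.toNat, j'.toNat, by omega,
      List.getElem?_eq_getElem (by omega), List.getElem?_eq_getElem (by omega)⟩

-- ===== VERDICT (by name: the statement is the Claim_ definition above) =====
theorem mekong_spec : Claim_equal_mekong := by
  intro L div _ _
  unfold Spec_mekong
  exact pv_main L div
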